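-- pv_equiv track=rewrite | github.com/ali-negary/QueraLand | balad/Q1_candy_crush.py | re_order_main
-- ===== SOURCE A (Python) =====
-- def get_number_of_iterations(n) -> int:
--     number_list = {1: 1, 2: 3}
--     for i in range(1, n):
--         number_list[i + 2] = 2 * i + 3
--     return number_list[n]
--
-- def re_order_main(list_of_lists) -> list:
--     iterations = get_number_of_iterations(len(list_of_lists))
--     numbers_list = {}
--     for i in range(len(list_of_lists)):
--         for j in range(len(list_of_lists[i])):
--             numbers_list[(i, j)] = list_of_lists[i][j]
--     final_list = []
--     for i in range(iterations):
--         keys_summed_in_i = [key for key in numbers_list.keys() if key[0] + key[1] == i]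
--         # sort values by the first element of the key
--         keys_summed_in_i.sort(key=lambda x: x[0], reverse=True)
--         final_list += [numbers_list[key] for key in keys_summed_in_i]
--     return final_list
-- ===== SOURCE B (Python) =====
-- def re_order_main(list_of_lists) -> list:
--     n = len(list_of_lists)
--     buckets = {}
--     for i, row in enumerate(list_of_lists):
--         for j, v in enumerate(row):
--             buckets.setdefault(i + j, []).append(v)
--     out = []
--     for d in range(2 * n - 1):
--         out.extend(reversed(buckets.get(d, [])))
--     return out
-- ===== Notes on version B (the rewrite author's own statement) =====
-- stated objective: faster
-- what changed: B buckets each cell by its anti-diagonal index i+j in one pass and emits each bucket reversed, instead of A's per-diagonal rescans of the whole key dictionary; the dict-simulated recurrence for the diagonal count is replaced by the closed range 2*n-1.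
-- outside the precondition, e.g. on re_order_main([]): A raises KeyError, B returns []
import Mathlib
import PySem

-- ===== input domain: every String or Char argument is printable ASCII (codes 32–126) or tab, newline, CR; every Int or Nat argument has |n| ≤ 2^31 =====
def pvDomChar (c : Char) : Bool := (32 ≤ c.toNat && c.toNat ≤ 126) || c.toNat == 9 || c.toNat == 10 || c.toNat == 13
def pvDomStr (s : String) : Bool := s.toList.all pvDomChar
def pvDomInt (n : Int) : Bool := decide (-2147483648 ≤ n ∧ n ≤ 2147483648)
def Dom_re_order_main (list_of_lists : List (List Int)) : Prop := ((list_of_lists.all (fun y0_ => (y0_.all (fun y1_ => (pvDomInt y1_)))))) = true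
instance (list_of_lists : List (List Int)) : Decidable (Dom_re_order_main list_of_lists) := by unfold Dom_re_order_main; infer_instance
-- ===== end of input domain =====

-- One honest line: B replaces A's per-diagonal rescans of the whole cell dictionary by a
-- single bucketing pass over the cells keyed by i+j (buckets emitted reversed), and the
-- dict-simulated recurrence for the diagonal count by the closed range 2*n-1.

-- ===== PORT A =====
-- literal transliteration of get_number_of_iterations; the final dict lookup raises KeyError
-- in Python exactly when n = 0 (excluded by Pre_); getD's default 0 is never the claimed value.
def get_number_of_iterations (n : Int) : Int :=
  let number_list : PySem.Dict Int Int := ((PySem.Dict.empty.insert 1 1).insert 2 3)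
  let number_list := (PySem.List.pyRange 1 n 1).foldl
    (fun d i => d.insert (i + 2) (2 * i + 3)) number_list
  number_list.getD n 0

def re_order_main (list_of_lists : List (List Int)) : List Int :=
  let iterations := get_number_of_iterations (list_of_lists.length : Int)
  let numbers_list : PySem.Dict (Int × Int) Int :=
    (PySem.List.pyRange 0 (list_of_lists.length : Int) 1).foldl (fun d i =>
      let row := PySem.List.pyGetD list_of_lists i []
      (PySem.List.pyRange 0 (row.length : Int) 1).foldl
        (fun d j => d.insert (i, j) (PySem.List.pyGetD row j 0)) d)
      PySem.Dict.empty
  (PySem.List.pyRange 0 iterations 1).foldl (fun final_list i =>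
      let keys_summed_in_i := numbers_list.keys.filter (fun k => k.1 + k.2 == i)
      let keys_summed_in_i := PySem.List.sorted keys_summed_in_i (fun k => k.1) true
      final_list ++ keys_summed_in_i.map (fun k => numbers_list.getD k 0)) []

-- ===== PORT B =====
-- buckets.setdefault(i+j, []).append(v) mutates the stored list in place:
-- ported as Dict.modify (i+j) [] (· ++ [v]), which is exact.
def re_order_main_alt (list_of_lists : List (List Int)) : List Int :=
  let n : Int := (list_of_lists.length : Int)
  let buckets : PySem.Dict Int (List Int) :=
    (PySem.List.enumerate list_of_lists 0).foldl (fun b p =>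
      (PySem.List.enumerate p.2 0).foldl
        (fun b q => b.modify (p.1 + q.1) [] (· ++ [q.2])) b)
      PySem.Dict.empty
  (PySem.List.pyRange 0 (2 * n - 1) 1).foldl
    (fun out d => out ++ (buckets.getD d []).reverse) []

-- ===== PRECONDITION & SPEC =====
-- A raises KeyError on the empty list (get_number_of_iterations(0) looks up key 0, never created);
-- Pre_ excludes exactly that input. B naturally returns [] there.
def Pre_re_order_main (list_of_lists : List (List Int)) : Prop := list_of_lists ≠ []
instance (list_of_lists : List (List Int)) : Decidable (Pre_re_order_main list_of_lists) := by unfold Pre_re_order_main; infer_instance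
def pvWitness_re_order_main : List (List Int) := [[1, 2], [3]]

def Spec_re_order_main (list_of_lists : List (List Int)) (out : List Int) : Prop := out = re_order_main_alt list_of_lists
instance (list_of_lists : List (List Int)) (out : List Int) : Decidable (Spec_re_order_main list_of_lists out) := by unfold Spec_re_order_main; infer_instance

-- ===== CLAIM (what is proved, stated in full; the proofs are below) =====
def Claim_equal_re_order_main : Prop := ∀ (list_of_lists : List (List Int)), Dom_re_order_main list_of_lists → Pre_re_order_main list_of_lists → Spec_re_order_main list_of_lists (re_order_main list_of_lists)


-- ===== LEMMAS AND PROOFS =====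

-- proof-only: the matrix cells ((i, j), value) in row-major order
def pvCells (m : List (List Int)) : List ((Int × Int) × Int) :=
  (PySem.List.enumerate m 0).flatMap
    (fun p => (PySem.List.enumerate p.2 0).map (fun q => ((p.1, q.1), q.2)))

def pvAdict (m : List (List Int)) : PySem.Dict (Int × Int) Int :=
  (pvCells m).foldl (fun d c => d.insert c.1 c.2) PySem.Dict.empty

def pvBdict (m : List (List Int)) : PySem.Dict Int (List Int) :=
  ((pvCells m).map (fun c => (c.1.1 + c.1.2, c.2))).foldl
    (fun b p => b.modify p.1 [] (fun x => x ++ [p.2])) PySem.Dict.empty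

theorem pvIterLoop (t : Nat) : ∀ k : Int, 1 ≤ k → k ≤ (t : Int) + 2 →
    ((PySem.List.pyRange 1 ((t : Int) + 1) 1).foldl (fun d i => d.insert (i + 2) (2 * i + 3))
      ((PySem.Dict.empty.insert 1 1).insert 2 3)).getD k 0 = 2 * k - 1 := by
  induction t with
  | zero =>
    intro k h1 h2
    rw [show ((0 : Nat) : Int) + 1 = 1 by norm_num, PySem.List.pyRange_one_eq_nil le_rfl]
    simp only [List.foldl_nil, PySem.Dict.getD_insert, PySem.Dict.getD_empty]
    norm_num at h2
    split_ifs <;> omega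
  | succ t ih =>
    intro k h1 h2
    have h : (1 : Int) ≤ (t : Int) + 1 := by omega
    rw [show ((t + 1 : Nat) : Int) + 1 = ((t : Int) + 1) + 1 by push_cast; ring,
      PySem.List.pyRange_one_succ_right h, List.foldl_append]
    simp only [List.foldl_cons, List.foldl_nil, PySem.Dict.getD_insert]
    split_ifs with hk
    · omega
    · exact ih k h1 (by push_cast at h2 ⊢; omega)

theorem pvIter_eq (n : Int) (h : 1 ≤ n) : get_number_of_iterations n = 2 * n - 1 := by
  have ht : ((n - 1).toNat : Int) + 1 = n := by omega
  have hl := pvIterLoop (n - 1).toNat n h (by omega)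
  rw [ht] at hl
  simpa [get_number_of_iterations] using hl

theorem pvCells_pairwise (m : List (List Int)) :
    (pvCells m).Pairwise (fun a b => a.1.1 < b.1.1 ∨ (a.1.1 = b.1.1 ∧ a.1.2 < b.1.2)) := by
  unfold pvCells
  rw [List.pairwise_flatMap]
  constructor
  · intro p _
    rw [List.pairwise_map]
    exact (PySem.List.pairwise_lt_enumerate p.2 0).imp (fun h => Or.inr ⟨rfl, h⟩)
  · refine (PySem.List.pairwise_lt_enumerate m 0).imp ?_
    intro a b h x hx y hy
    simp only [List.mem_map] at hx hy
    obtain ⟨q, _, rfl⟩ := hx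
    obtain ⟨r, _, rfl⟩ := hy
    exact Or.inl h

theorem pvKeys_nodup (m : List (List Int)) : ((pvCells m).map (fun c => c.1)).Nodup := by
  refine (pvCells_pairwise m).map _ (fun a b h e => ?_)
  rw [e] at h
  rcases h with h | ⟨h1, h2⟩ <;> omega

theorem pvAdict_items (m : List (List Int)) : (pvAdict m).items = pvCells m := by
  have h := PySem.Dict.items_foldl_insert_fresh (pvCells m) (fun c => c.1) (fun c => c.2)
    PySem.Dict.empty (fun a _ => PySem.Dict.contains_empty _) (by simpa using pvKeys_nodup m)
  unfold pvAdict
  simpa using h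

theorem pvAdict_keys (m : List (List Int)) : (pvAdict m).keys = (pvCells m).map (fun c => c.1) := by
  simp only [PySem.Dict.keys, pvAdict_items]

theorem pvAdict_getD (m : List (List Int)) (c : (Int × Int) × Int) (hc : c ∈ pvCells m) :
    (pvAdict m).getD c.1 0 = c.2 := by
  refine PySem.Dict.getD_of_mem_items (pvAdict m) ?_ ?_ 0
  · rw [pvAdict_items]; exact hc
  · rw [pvAdict_keys]; exact pvKeys_nodup m

theorem pvBdict_getD (m : List (List Int)) (d : Int) :
    (pvBdict m).getD d [] = ((pvCells m).filter (fun c => c.1.1 + c.1.2 == d)).map (fun c => c.2) := by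
  unfold pvBdict
  rw [PySem.Dict.getD_foldl_modify_append]
  simp [List.filter_map, List.map_map, Function.comp_def]

theorem pvA_dict_eq (m : List (List Int)) :
    ((PySem.List.pyRange 0 (m.length : Int) 1).foldl (fun d i =>
        let row := PySem.List.pyGetD m i []
        (PySem.List.pyRange 0 (row.length : Int) 1).foldl
          (fun d j => d.insert (i, j) (PySem.List.pyGetD row j 0)) d)
        PySem.Dict.empty) = pvAdict m := by
  unfold pvAdict pvCells
  rw [List.foldl_flatMap]
  rw [PySem.List.enumerate_eq_map_pyRange m [], List.foldl_map]
  simp only [PySem.List.len_eq]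
  congr 1
  funext d i
  rw [List.foldl_map, PySem.List.enumerate_eq_map_pyRange _ 0, List.foldl_map]
  simp only [PySem.List.len_eq]

theorem pvB_dict_eq (m : List (List Int)) :
    ((PySem.List.enumerate m 0).foldl (fun b p =>
        (PySem.List.enumerate p.2 0).foldl
          (fun b q => b.modify (p.1 + q.1) [] (fun x => x ++ [q.2])) b)
        PySem.Dict.empty) = pvBdict m := by
  unfold pvBdict pvCells
  rw [List.map_flatMap, List.foldl_flatMap]
  congr 1
  funext b p
  rw [List.map_map, List.foldl_map]
  simp only [Function.comp_def]

theorem pvSeg_eq (m : List (List Int)) (d : Int) :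
    (PySem.List.sorted (((pvAdict m).keys).filter (fun k => k.1 + k.2 == d)) (fun k => k.1) true).map
        (fun k => (pvAdict m).getD k 0)
      = ((pvBdict m).getD d []).reverse := by
  rw [pvBdict_getD, pvAdict_keys, List.filter_map]
  have hFpair : (List.filter ((fun k => k.1 + k.2 == d) ∘ fun c => c.1) (pvCells m)).Pairwise
      (fun a b => a.1.1 < b.1.1) := by
    refine ((pvCells_pairwise m).filter _).imp_of_mem ?_
    intro a b ha hb h
    have ha' := (List.mem_filter.mp ha).2
    have hb' := (List.mem_filter.mp hb).2
    simp only [Function.comp_apply, beq_iff_eq] at ha' hb'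
    rcases h with h | ⟨h1, h2⟩
    · exact h
    · omega
  have hsorted := PySem.List.sorted_rev_eq_of_perm_of_pairwise_gt
    (List.map (fun c => c.1) (List.filter ((fun k => k.1 + k.2 == d) ∘ fun c => c.1) (pvCells m)))
    ((List.map (fun c => c.1) (List.filter ((fun k => k.1 + k.2 == d) ∘ fun c => c.1) (pvCells m))).reverse)
    (fun k => k.1) (List.reverse_perm _)
    (by rw [List.pairwise_reverse, List.pairwise_map]; exact hFpair)
  rw [hsorted, List.map_reverse, List.map_map]
  congr 1
  simp only [Function.comp_def]
  refine List.map_congr_left ?_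
  intro c hc
  exact pvAdict_getD m c (List.mem_of_mem_filter hc)

-- ===== VERDICT (by name: the statement is the Claim_ definition above) =====
theorem re_order_main_spec : Claim_equal_re_order_main := by
  intro m _ hpre
  unfold Spec_re_order_main
  have hn : (1 : Int) ≤ (m.length : Int) := by
    have h0 : 0 < m.length := List.length_pos_iff.mpr hpre
    omega
  simp only [re_order_main, re_order_main_alt]
  rw [pvIter_eq _ hn, pvA_dict_eq, pvB_dict_eq]
  rw [PySem.List.foldl_append_eq_flatMap, PySem.List.foldl_append_eq_flatMap]
  simp only [List.nil_append]
  congr 1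
  funext d
  exact pvSeg_eq m d
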